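-- pv_equiv track=rewrite | github.com/petekubiak/chorded-keyboard | main.py | generate_chord_masks
-- ===== SOURCE A (Python) =====
-- from itertools import combinations
-- from typing import Dict, List, Optional, Tuple
--
-- def generate_chord_masks(max_size: int) -> List[int]:
--     """Generate all finger-subset masks up to size max_size (excluding empty)."""
--     masks = []
--     fingers = list(range(8))
--     for r in range(1, max_size + 1):
--         for comb in combinations(fingers, r):
--             m = 0
--             for f in comb:
--                 m |= 1 << f
--             masks.append(m)
--     return masks
-- ===== SOURCE B (Python) =====
-- def generate_chord_masks(max_size):
--     """Generate all finger-subset masks up to size max_size (excluding empty)."""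
--     masks = []
--
--     def pick(start, r, mask):
--         if r == 0:
--             masks.append(mask)
--             return
--         for f in range(start, 8):
--             pick(f + 1, r - 1, mask | (1 << f))
--
--     for r in range(1, max_size + 1):
--         pick(0, r, 0)
--     return masks
-- ===== Notes on version B (the rewrite author's own statement) =====
-- stated objective: alternative
-- what changed: Replaces itertools.combinations plus an inner bit-OR loop over each tuple with a recursive picker that chooses fingers in strictly increasing index order and threads the partially built mask down the recursion, emitting it directly.
import Mathlib
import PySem

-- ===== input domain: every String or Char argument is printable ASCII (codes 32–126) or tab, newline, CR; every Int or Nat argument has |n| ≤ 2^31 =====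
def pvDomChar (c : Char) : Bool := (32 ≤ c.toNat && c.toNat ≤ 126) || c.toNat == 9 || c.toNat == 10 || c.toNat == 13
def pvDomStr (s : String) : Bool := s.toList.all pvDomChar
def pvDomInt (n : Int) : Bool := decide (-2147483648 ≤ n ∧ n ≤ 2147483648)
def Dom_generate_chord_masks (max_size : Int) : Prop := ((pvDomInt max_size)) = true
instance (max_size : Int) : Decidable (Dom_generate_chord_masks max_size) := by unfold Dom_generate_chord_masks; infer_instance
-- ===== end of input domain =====

-- B replaces itertools.combinations + the inner bit-building loop by a recursive picker that
-- threads the partially built mask down the recursion (objective: alternative decomposition).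

-- ===== PORT A =====
-- itertools.combinations → PySem.List.combinations (CPython order).
-- r comes from range(1, max_size+1) so r ≥ 1 and r.toNat is exact; f ∈ 0..7 so f.toNat is exact.
def generate_chord_masks (max_size : Int) : List Int :=
  let fingers : List Int := PySem.List.pyRange 0 8 1
  (PySem.List.pyRange 1 (max_size + 1) 1).foldl
    (fun masks r =>
      (PySem.List.combinations fingers r.toNat).foldl
        (fun masks comb =>
          masks ++ [comb.foldl (fun m f => PySem.Int.bor m ((1 : Int) <<< f.toNat)) 0])
        masks)
    []

-- ===== PORT B =====
-- recursive picker: choose r fingers with strictly increasing indices from `start`,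
-- emitting the threaded mask when r = 0 (flatMap reproduces the append order of Source B's recursion)
def pvPick : Nat → Nat → Int → List Int
  | _, 0, mask => [mask]
  | start, r + 1, mask =>
      (List.range' start (8 - start)).flatMap
        (fun f => pvPick (f + 1) r (PySem.Int.bor mask ((1 : Int) <<< f)))

def generate_chord_masks_alt (max_size : Int) : List Int :=
  (PySem.List.pyRange 1 (max_size + 1) 1).foldl
    (fun masks r => masks ++ pvPick 0 r.toNat 0) []

-- ===== PRECONDITION & SPEC =====
def Spec_generate_chord_masks (max_size : Int) (out : List Int) : Prop := out = generate_chord_masks_alt max_size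
instance (max_size : Int) (out : List Int) : Decidable (Spec_generate_chord_masks max_size out) := by unfold Spec_generate_chord_masks; infer_instance

-- ===== CLAIM (what is proved, stated in full; the proofs are below) =====
def Claim_equal_generate_chord_masks : Prop := ∀ (max_size : Int), Dom_generate_chord_masks max_size → Spec_generate_chord_masks max_size (generate_chord_masks max_size)

-- ===== LEMMAS AND PROOFS =====

-- once fewer than r fingers remain, the picker yields nothing
theorem pvPick_eq_nil (r : Nat) : ∀ (start : Nat) (mask : Int),
    8 - start < r → pvPick start r mask = [] := by
  induction r with
  | zero => intro start mask h; omega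
  | succ r ih =>
      intro start mask h
      simp only [pvPick, List.flatMap_eq_nil_iff]
      intro f hf
      rw [List.mem_range'_1] at hf
      exact ih (f + 1) _ (by omega)

-- per-size block: the picker equals the combinations block of port A
theorem pvPick_eq_combinations (n : Nat) :
    pvPick 0 n 0 =
      (PySem.List.combinations (PySem.List.pyRange 0 8 1) n).map
        (fun comb => comb.foldl (fun m f => PySem.Int.bor m ((1 : Int) <<< f.toNat)) 0) := by
  by_cases h : n ≤ 8
  · interval_cases n <;> decide
  · rw [pvPick_eq_nil n 0 0 (by omega)]
    have hlen : (PySem.List.pyRange 0 8 1).length < n := by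
      have h8 : (PySem.List.pyRange 0 8 1).length = 8 := by decide
      omega
    rw [PySem.List.combinations_eq_nil_of_length_lt _ hlen]
    rfl

-- ===== VERDICT (by name: the statement is the Claim_ definition above) =====
theorem generate_chord_masks_spec : Claim_equal_generate_chord_masks := by
  intro max_size _
  unfold Spec_generate_chord_masks generate_chord_masks generate_chord_masks_alt
  have hstep : (fun (masks : List Int) (r : Int) =>
      (PySem.List.combinations (PySem.List.pyRange 0 8 1) r.toNat).foldl
        (fun masks comb =>
          masks ++ [comb.foldl (fun m f => PySem.Int.bor m ((1 : Int) <<< f.toNat)) 0]) masks)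
      = (fun (masks : List Int) (r : Int) => masks ++ pvPick 0 r.toNat 0) := by
    funext masks r
    rw [PySem.List.foldl_append_singleton_eq_map, pvPick_eq_combinations]
  simp only [hstep]
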